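-- pv_equiv track=rewrite | github.com/meelgroup/RelNet | relnet/weighted_to_unweighted.py | _weighted_edge
-- ===== SOURCE A (Python) =====
-- def _weighted_edge(b, head=0, tail=1, vertex_counter=0):
--     """Details as in paper [PDMV-2019]"""
--     # Parameters
--     z = [head]
--     for bit in b:
--         if bit == 0:
--             vertex_counter += 1
--
--             if vertex_counter == tail:
--                 vertex_counter += 1
--
--             z.append(vertex_counter)
--
--         else:
--             z.append(z[-1])
--
--     def _eta(k):
--         if b[k - 1]:
--             return z[k - 1], tail
--         else:
--             return z[k - 1], z[k]
--
--     return [_eta(k) for k in range(1, len(b) + 1)], vertex_counter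
-- ===== SOURCE B (Python) =====
-- def _weighted_edge(b, head=0, tail=1, vertex_counter=0):
--     edges = []
--     prev = head
--     for bit in b:
--         if bit == 0:
--             vertex_counter += 1
--             if vertex_counter == tail:
--                 vertex_counter += 1
--             edges.append((prev, vertex_counter))
--             prev = vertex_counter
--         else:
--             edges.append((prev, tail))
--     return edges, vertex_counter
-- ===== Notes on version B (the rewrite author's own statement) =====
-- stated objective: simpler
-- what changed: B fuses A's two passes (building the intermediate z vertex array and then mapping the _eta closure over an index range) into a single loop that keeps only the previous vertex and emits each edge directly, eliminating the z array and the closure.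
import Mathlib
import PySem

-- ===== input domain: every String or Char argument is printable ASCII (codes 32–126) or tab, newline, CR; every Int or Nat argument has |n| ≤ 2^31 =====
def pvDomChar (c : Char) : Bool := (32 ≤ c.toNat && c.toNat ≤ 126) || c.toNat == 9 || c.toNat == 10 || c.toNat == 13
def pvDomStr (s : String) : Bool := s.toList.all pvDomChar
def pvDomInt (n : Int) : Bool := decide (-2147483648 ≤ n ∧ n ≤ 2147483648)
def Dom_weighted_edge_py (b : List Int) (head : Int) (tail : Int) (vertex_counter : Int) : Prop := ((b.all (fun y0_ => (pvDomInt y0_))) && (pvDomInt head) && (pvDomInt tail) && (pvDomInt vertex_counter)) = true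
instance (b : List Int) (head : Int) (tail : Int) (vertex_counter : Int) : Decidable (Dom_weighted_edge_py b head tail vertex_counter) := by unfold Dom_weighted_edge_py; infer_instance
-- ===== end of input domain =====

-- B fuses A's two passes (the `z` array build plus the `_eta` comprehension) into one
-- loop that keeps only the previous vertex; same exact output (objective: simpler).

-- ===== PORT A =====
-- the body of A's `for bit in b` loop (z, vertex_counter as state); z[-1] is exact: z is always nonempty
def pvZStep (tail : Int) (st : List Int × Int) (bit : Int) : List Int × Int :=
  if bit == 0 then
    let v := st.2 + 1
    let v := if v == tail then v + 1 else v
    (st.1 ++ [v], v)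
  else
    (st.1 ++ [PySem.List.pyGetD st.1 (-1) 0], st.2)

-- A's closure `_eta`; the pyGetD defaults are never hit: k ∈ range(1, len(b)+1) and |z| = |b|+1
def pvEta (b z : List Int) (tail : Int) (k : Int) : Int × Int :=
  if PySem.List.pyGetD b (k - 1) 0 ≠ 0 then
    (PySem.List.pyGetD z (k - 1) 0, tail)
  else
    (PySem.List.pyGetD z (k - 1) 0, PySem.List.pyGetD z k 0)

def weighted_edge_py (b : List Int) (head : Int) (tail : Int) (vertex_counter : Int) : (List (Int × Int)) × Int :=
  let s := b.foldl (pvZStep tail) ([head], vertex_counter)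
  ((PySem.List.pyRange 1 ((PySem.List.len b) + 1) 1).map (pvEta b s.1 tail), s.2)

-- ===== PORT B =====
-- B's loop body: state (edges, prev, vertex_counter)
def pvBStep (tail : Int) (st : List (Int × Int) × Int × Int) (bit : Int) : List (Int × Int) × Int × Int :=
  if bit == 0 then
    let v := st.2.2 + 1
    let v := if v == tail then v + 1 else v
    (st.1 ++ [(st.2.1, v)], v, v)
  else
    (st.1 ++ [(st.2.1, tail)], st.2.1, st.2.2)

def weighted_edge_py_alt (b : List Int) (head : Int) (tail : Int) (vertex_counter : Int) : (List (Int × Int)) × Int :=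
  let s := b.foldl (pvBStep tail) ([], head, vertex_counter)
  (s.1, s.2.2)

-- ===== PRECONDITION & SPEC =====
def Spec_weighted_edge_py (b : List Int) (head : Int) (tail : Int) (vertex_counter : Int) (out : (List (Int × Int)) × Int) : Prop := out = weighted_edge_py_alt b head tail vertex_counter
instance (b : List Int) (head : Int) (tail : Int) (vertex_counter : Int) (out : (List (Int × Int)) × Int) : Decidable (Spec_weighted_edge_py b head tail vertex_counter out) := by unfold Spec_weighted_edge_py; infer_instance

-- ===== CLAIM (what is proved, stated in full; the proofs are below) =====
def Claim_equal_weighted_edge_py : Prop := ∀ (b : List Int) (head : Int) (tail : Int) (vertex_counter : Int), Dom_weighted_edge_py b head tail vertex_counter → Spec_weighted_edge_py b head tail vertex_counter (weighted_edge_py b head tail vertex_counter)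

-- ===== LEMMAS AND PROOFS =====

-- A's z-fold only appends: a prefix before the last element is carried through unchanged
theorem zfold_shift (b : List Int) (t : Int) :
    ∀ (acc : List Int) (a v : Int),
      b.foldl (pvZStep t) (acc ++ [a], v)
        = (acc ++ (b.foldl (pvZStep t) ([a], v)).1, (b.foldl (pvZStep t) ([a], v)).2) := by
  induction b with
  | nil => intro acc a v; simp
  | cons bit rest ih =>
    intro acc a v
    by_cases hb : bit == 0
    · have s1 : pvZStep t (acc ++ [a], v) bit
          = ((acc ++ [a]) ++ [if v + 1 == t then v + 1 + 1 else v + 1],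
             if v + 1 == t then v + 1 + 1 else v + 1) := by
        simp [pvZStep, hb]
      have s2 : pvZStep t ([a], v) bit
          = ([a] ++ [if v + 1 == t then v + 1 + 1 else v + 1],
             if v + 1 == t then v + 1 + 1 else v + 1) := by
        simp [pvZStep, hb]
      rw [List.foldl_cons, List.foldl_cons, s1, s2, ih (acc ++ [a]), ih [a]]
      simp
    · have h1 : PySem.List.pyGetD [a] (-1) 0 = a := by
        rw [show ([a] : List Int) = [] ++ [a] by simp,
            PySem.List.pyGetD_neg_one_append_singleton]
      have s1 : pvZStep t (acc ++ [a], v) bit = ((acc ++ [a]) ++ [a], v) := by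
        simp [pvZStep, hb, PySem.List.pyGetD_neg_one_append_singleton]
      have s2 : pvZStep t ([a], v) bit = ([a] ++ [a], v) := by
        simp [pvZStep, hb, h1]
      rw [List.foldl_cons, List.foldl_cons, s1, s2, ih (acc ++ [a]), ih [a]]
      simp

-- the z list built from a singleton seed starts with that seed
theorem zfold_head (b : List Int) (t : Int) (a v : Int) :
    ∃ zs, (b.foldl (pvZStep t) ([a], v)).1 = a :: zs := by
  cases b with
  | nil => exact ⟨[], rfl⟩
  | cons bit rest =>
    by_cases hb : bit == 0
    · have s2 : pvZStep t ([a], v) bit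
          = ([a] ++ [if v + 1 == t then v + 1 + 1 else v + 1],
             if v + 1 == t then v + 1 + 1 else v + 1) := by
        simp [pvZStep, hb]
      rw [List.foldl_cons, s2, zfold_shift]
      exact ⟨_, rfl⟩
    · have h1 : PySem.List.pyGetD [a] (-1) 0 = a := by
        rw [show ([a] : List Int) = [] ++ [a] by simp,
            PySem.List.pyGetD_neg_one_append_singleton]
      have s2 : pvZStep t ([a], v) bit = ([a] ++ [a], v) := by
        simp [pvZStep, hb, h1]
      rw [List.foldl_cons, s2, zfold_shift]
      exact ⟨_, rfl⟩

-- re-indexing the `_eta` comprehension after peeling the first bit and the first z entry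
theorem eta_shift (bit : Int) (rest z' : List Int) (h t : Int) :
    (PySem.List.pyRange 2 ((rest.length : Int) + 2) 1).map (pvEta (bit :: rest) (h :: z') t)
      = (PySem.List.pyRange 1 ((rest.length : Int) + 1) 1).map (pvEta rest z' t) := by
  rw [PySem.List.pyRange_one, PySem.List.pyRange_one]
  have e1 : (((rest.length : Int) + 2) - 2).toNat = rest.length := by omega
  have e2 : (((rest.length : Int) + 1) - 1).toNat = rest.length := by omega
  rw [e1, e2, List.map_map, List.map_map]
  apply List.map_congr_left
  intro j _
  simp only [Function.comp_apply, pvEta]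
  have c1 : (2 : Int) + (j : Int) - 1 = ((j + 1 : Nat) : Int) := by push_cast; omega
  have c2 : (1 : Int) + (j : Int) - 1 = ((j : Nat) : Int) := by omega
  have c3 : (2 : Int) + (j : Int) = ((j + 2 : Nat) : Int) := by push_cast; omega
  have c4 : (1 : Int) + (j : Int) = ((j + 1 : Nat) : Int) := by push_cast; omega
  rw [c1, c2, c3, c4]
  simp only [PySem.List.pyGetD_natCast, List.getD_cons_succ]

-- B's fold only appends to the edge accumulator
theorem bfold_shift (b : List Int) (t : Int) :
    ∀ (acc es : List (Int × Int)) (p v : Int),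
      b.foldl (pvBStep t) (acc ++ es, p, v)
        = (acc ++ (b.foldl (pvBStep t) (es, p, v)).1, (b.foldl (pvBStep t) (es, p, v)).2) := by
  induction b with
  | nil => intro acc es p v; simp
  | cons bit rest ih =>
    intro acc es p v
    by_cases hb : bit == 0
    · have s1 : pvBStep t (acc ++ es, p, v) bit
          = (acc ++ (es ++ [(p, if v + 1 == t then v + 1 + 1 else v + 1)]),
             if v + 1 == t then v + 1 + 1 else v + 1,
             if v + 1 == t then v + 1 + 1 else v + 1) := by
        simp [pvBStep, hb]
      have s2 : pvBStep t ((es, p, v) : List (Int × Int) × Int × Int) bit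
          = (es ++ [(p, if v + 1 == t then v + 1 + 1 else v + 1)],
             if v + 1 == t then v + 1 + 1 else v + 1,
             if v + 1 == t then v + 1 + 1 else v + 1) := by
        simp [pvBStep, hb]
      rw [List.foldl_cons, List.foldl_cons, s1, s2, ih]
    · have s1 : pvBStep t (acc ++ es, p, v) bit = (acc ++ (es ++ [(p, t)]), p, v) := by
        simp [pvBStep, hb]
      have s2 : pvBStep t ((es, p, v) : List (Int × Int) × Int × Int) bit
          = (es ++ [(p, t)], p, v) := by
        simp [pvBStep, hb]
      rw [List.foldl_cons, List.foldl_cons, s1, s2, ih]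

theorem main_eq (b : List Int) : ∀ (h t v : Int),
    weighted_edge_py b h t v = weighted_edge_py_alt b h t v := by
  induction b with
  | nil =>
    intro h t v
    simp [weighted_edge_py, weighted_edge_py_alt, PySem.List.pyRange_one_eq_nil, PySem.List.len]
  | cons bit rest ih =>
    intro h t v
    have hlen : PySem.List.len (bit :: rest) + 1 = (rest.length : Int) + 2 := by
      simp [PySem.List.len]; omega
    by_cases hb : bit == 0
    · -- bit == 0: new vertex v2, edge (h, v2)
      set v2 : Int := if v + 1 == t then v + 1 + 1 else v + 1 with hv2
      have hz : (bit :: rest).foldl (pvZStep t) ([h], v)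
          = ([h] ++ (rest.foldl (pvZStep t) ([v2], v2)).1, (rest.foldl (pvZStep t) ([v2], v2)).2) := by
        simp only [List.foldl_cons, pvZStep, hb, if_true, ← hv2]
        exact zfold_shift rest t [h] v2 v2
      have hbfold : (bit :: rest).foldl (pvBStep t) ([], h, v)
          = ([(h, v2)] ++ (rest.foldl (pvBStep t) ([], v2, v2)).1,
             (rest.foldl (pvBStep t) ([], v2, v2)).2) := by
        simp only [List.foldl_cons, pvBStep, hb, if_true, ← hv2, List.nil_append]
        rw [show ([(h, v2)] : List (Int × Int)) = [(h, v2)] ++ [] by simp]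
        exact bfold_shift rest t [(h, v2)] [] v2 v2
      obtain ⟨zs, hzs⟩ := zfold_head rest t v2 v2
      have heta1 : pvEta (bit :: rest) (h :: (rest.foldl (pvZStep t) ([v2], v2)).1) t 1
          = (h, v2) := by
        have hb' : bit = 0 := by simpa using hb
        have i0 : (1 : Int) - 1 = ((0 : Nat) : Int) := by norm_num
        simp only [pvEta, hzs, i0]
        rw [show (1 : Int) = ((0 : Nat) : Int) + 1 by norm_num]
        simp [hb', PySem.List.pyGetD]
      show weighted_edge_py (bit :: rest) h t v = _
      simp only [weighted_edge_py, hz, hlen]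
      rw [PySem.List.pyRange_one_cons (by omega), List.map_cons, List.singleton_append,
          show (1 : Int) + 1 = 2 by norm_num, eta_shift bit rest _ h t, heta1]
      have := ih v2 t v2
      simp only [weighted_edge_py, weighted_edge_py_alt, PySem.List.len] at this
      simp only [weighted_edge_py_alt, hbfold, List.singleton_append]
      rw [Prod.ext_iff] at this ⊢
      refine ⟨?_, by simpa using this.2⟩
      show (h, v2) :: _ = (h, v2) :: _
      exact congrArg _ (by simpa using this.1)
    · -- bit != 0: edge (h, tail), prev unchanged
      have hz : (bit :: rest).foldl (pvZStep t) ([h], v)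
          = ([h] ++ (rest.foldl (pvZStep t) ([h], v)).1, (rest.foldl (pvZStep t) ([h], v)).2) := by
        simp only [List.foldl_cons, pvZStep, hb]
        have h1 : PySem.List.pyGetD [h] (-1) 0 = h := by
          rw [show ([h] : List Int) = [] ++ [h] by simp,
              PySem.List.pyGetD_neg_one_append_singleton]
        rw [h1]
        exact zfold_shift rest t [h] h v
      have hbfold : (bit :: rest).foldl (pvBStep t) ([], h, v)
          = ([(h, t)] ++ (rest.foldl (pvBStep t) ([], h, v)).1,
             (rest.foldl (pvBStep t) ([], h, v)).2) := by
        simp only [List.foldl_cons, pvBStep, hb, List.nil_append]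
        rw [show ([(h, t)] : List (Int × Int)) = [(h, t)] ++ [] by simp]
        exact bfold_shift rest t [(h, t)] [] h v
      have heta1 : pvEta (bit :: rest) (h :: (rest.foldl (pvZStep t) ([h], v)).1) t 1
          = (h, t) := by
        have hb' : ¬ bit = 0 := by simpa using hb
        have i0 : (1 : Int) - 1 = ((0 : Nat) : Int) := by norm_num
        simp only [pvEta, i0]
        simp [hb', PySem.List.pyGetD]
      show weighted_edge_py (bit :: rest) h t v = _
      simp only [weighted_edge_py, hz, hlen]
      rw [PySem.List.pyRange_one_cons (by omega), List.map_cons, List.singleton_append,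
          show (1 : Int) + 1 = 2 by norm_num, eta_shift bit rest _ h t, heta1]
      have := ih h t v
      simp only [weighted_edge_py, weighted_edge_py_alt, PySem.List.len] at this
      simp only [weighted_edge_py_alt, hbfold, List.singleton_append]
      rw [Prod.ext_iff] at this ⊢
      refine ⟨?_, by simpa using this.2⟩
      show (h, t) :: _ = (h, t) :: _
      exact congrArg _ (by simpa using this.1)

-- ===== VERDICT (by name: the statement is the Claim_ definition above) =====
theorem weighted_edge_py_spec : Claim_equal_weighted_edge_py := by
  intro b h t v _
  unfold Spec_weighted_edge_py
  exact main_eq b h t v
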